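-- pv_equiv track=rewrite | github.com/Piplopp/misc | Functions_automatic_Integration_roxygen_doc/src/fun_auto_integration_roxygen.py | get_comment_blocks
-- ===== SOURCE A (Python) =====
-- def get_comment_blocks(file_content, comment_symbol):
--     """
--         This function return a set of tuples containing the starting position
--         of a comment block and it's length
--
--         A block comment is defined by:
--             line starting with a comment_symbol
--             no empty lines nor non commented lines
--
--
--         file_content   : list containing the current file
--         comment_symbol : string defining a comment line
--     """
--
--
--     comment_blocks = set()
--     in_block = False # block delimiter
--     block_start = int() # starting index of a block
--     block_length = 0
--
--     for index, line in enumerate(file_content):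
--         is_commented = line.startswith(comment_symbol)
--         # comment line OK AND NOT in block yet -- define new block
--         if is_commented and not in_block:
--             in_block = True
--             block_start = index
--             block_length += 1
--         # comment line AND in block -- block_length ++
--         elif is_commented and in_block:
--             block_length += 1
--         # encounter not commented line in a block -- end of block
--         elif in_block:
--             comment_blocks.add((block_start, block_length))
--             in_block = False
--             block_length = 0
--         # uncommented line -- ignore
--         else:
--             continue
--
--     # Only if a commented line ends the file
--     if in_block: comment_blocks.add((block_start, block_length))
--     return comment_blocks
-- ===== SOURCE B (Python) =====
-- def get_comment_blocks(file_content, comment_symbol):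
--     """Run-scanner rewrite: instead of a stateful in_block flag and running
--     accumulator, scan for the start of each commented run and measure the
--     run in an inner scan, emitting (start, length) per run."""
--     blocks = set()
--     i = 0
--     n = len(file_content)
--     while i < n:
--         if file_content[i].startswith(comment_symbol):
--             j = i
--             while j < n and file_content[j].startswith(comment_symbol):
--                 j += 1
--             blocks.add((i, j - i))
--             i = j
--         else:
--             i += 1
--     return blocks
-- ===== Notes on version B (the rewrite author's own statement) =====
-- stated objective: alternative
-- what changed: Replaced the stateful in_block-flag/accumulator single fold (with an end-of-file flush) by a run-scanner: an outer loop finds each commented run's start and an inner scan measures its length, emitting (start, length) per run with no carried flag or trailing flush.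
import Mathlib
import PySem

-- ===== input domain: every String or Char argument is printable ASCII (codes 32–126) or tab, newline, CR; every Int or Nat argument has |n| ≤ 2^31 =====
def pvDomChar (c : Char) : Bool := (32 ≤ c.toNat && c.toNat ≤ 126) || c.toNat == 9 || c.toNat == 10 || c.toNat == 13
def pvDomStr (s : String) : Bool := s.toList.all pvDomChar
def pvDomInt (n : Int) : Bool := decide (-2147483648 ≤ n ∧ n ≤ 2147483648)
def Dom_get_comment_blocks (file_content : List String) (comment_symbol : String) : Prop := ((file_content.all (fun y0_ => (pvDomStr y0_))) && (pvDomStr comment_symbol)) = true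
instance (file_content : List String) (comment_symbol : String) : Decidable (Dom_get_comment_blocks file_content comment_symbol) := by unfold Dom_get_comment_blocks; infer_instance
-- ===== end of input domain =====

-- B replaces A's in_block-flag fold (with end-of-file flush) by a run-scanner emitting one
-- (start, length) pair per commented run; same cost, different decomposition (objective: alternative).

-- ===== PORT A =====
-- one loop iteration of A: state = (comment_blocks, in_block, block_start, block_length)
def aStep (comment_symbol : String)
    (st : PySem.Set (Int × Int) × Bool × Int × Int) (p : Int × String) :
    PySem.Set (Int × Int) × Bool × Int × Int :=
  let is_commented := PySem.Str.startswith p.2 comment_symbol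
  if is_commented && !st.2.1 then (st.1, true, p.1, st.2.2.2 + 1)
  else if is_commented && st.2.1 then (st.1, st.2.1, st.2.2.1, st.2.2.2 + 1)
  else if st.2.1 then (PySem.Set.add st.1 (st.2.2.1, st.2.2.2), false, st.2.2.1, 0)
  else st

def get_comment_blocks (file_content : List String) (comment_symbol : String) : List (Int × Int) :=
  let st := (PySem.List.enumerate file_content 0).foldl (aStep comment_symbol)
      (PySem.Set.empty, false, 0, 0)
  if st.2.1 then PySem.Set.add st.1 (st.2.2.1, st.2.2.2) else st.1

-- ===== PORT B =====
-- inner scan of Source B: length of the leading commented run and the remainder after it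
def spanC (comment_symbol : String) : List String → Nat × List String
  | [] => (0, [])
  | l :: ls =>
    if PySem.Str.startswith l comment_symbol then
      ((spanC comment_symbol ls).1 + 1, (spanC comment_symbol ls).2)
    else (0, l :: ls)

theorem spanC_len_le (comment_symbol : String) (ls : List String) :
    (spanC comment_symbol ls).2.length ≤ ls.length := by
  induction ls with
  | nil => simp [spanC]
  | cons l ls ih =>
    simp only [spanC]
    split
    · exact Nat.le_succ_of_le ih
    · exact Nat.le_refl _

-- outer loop of Source B: i is the index of the head of the remaining lines
def bGo (comment_symbol : String) : List String → Int → PySem.Set (Int × Int) → PySem.Set (Int × Int)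
  | [], _, acc => acc
  | l :: ls, i, acc =>
    if PySem.Str.startswith l comment_symbol then
      bGo comment_symbol (spanC comment_symbol ls).2
        (i + 1 + ((spanC comment_symbol ls).1 : Int))
        (PySem.Set.add acc (i, 1 + ((spanC comment_symbol ls).1 : Int)))
    else bGo comment_symbol ls (i + 1) acc
termination_by ls => ls.length
decreasing_by
  · exact Nat.lt_succ_of_le (spanC_len_le comment_symbol ls)
  · exact Nat.lt_succ_self _

def get_comment_blocks_alt (file_content : List String) (comment_symbol : String) : List (Int × Int) :=
  bGo comment_symbol file_content 0 PySem.Set.empty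

-- ===== PRECONDITION & SPEC =====
def Spec_get_comment_blocks (file_content : List String) (comment_symbol : String) (out : List (Int × Int)) : Prop := out = get_comment_blocks_alt file_content comment_symbol
instance (file_content : List String) (comment_symbol : String) (out : List (Int × Int)) : Decidable (Spec_get_comment_blocks file_content comment_symbol out) := by unfold Spec_get_comment_blocks; infer_instance

-- ===== CLAIM (what is proved, stated in full; the proofs are below) =====
def Claim_equal_get_comment_blocks : Prop := ∀ (file_content : List String) (comment_symbol : String), Dom_get_comment_blocks file_content comment_symbol → Spec_get_comment_blocks file_content comment_symbol (get_comment_blocks file_content comment_symbol)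

-- ===== LEMMAS AND PROOFS =====

-- A's trailing end-of-file flush
def aFlush (st : PySem.Set (Int × Int) × Bool × Int × Int) : List (Int × Int) :=
  if st.2.1 then PySem.Set.add st.1 (st.2.2.1, st.2.2.2) else st.1

-- simultaneous invariant: A's fold, flushed, equals B's run-scanner, both from
-- the not-in-block state (OUT) and from inside a block (IN)
theorem a_eq_b (comment_symbol : String) (ls : List String) :
    (∀ (i : Int) (acc : PySem.Set (Int × Int)) (bs : Int),
      aFlush ((PySem.List.enumerate ls i).foldl (aStep comment_symbol) (acc, false, bs, 0))
        = bGo comment_symbol ls i acc) ∧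
    (∀ (i : Int) (acc : PySem.Set (Int × Int)) (bs bl : Int),
      aFlush ((PySem.List.enumerate ls i).foldl (aStep comment_symbol) (acc, true, bs, bl))
        = bGo comment_symbol (spanC comment_symbol ls).2
            (i + ((spanC comment_symbol ls).1 : Int))
            (PySem.Set.add acc (bs, bl + ((spanC comment_symbol ls).1 : Int)))) := by
  induction ls with
  | nil =>
    constructor
    · intro i acc bs
      simp [PySem.List.enumerate, aFlush, bGo]
    · intro i acc bs bl
      simp [PySem.List.enumerate, aFlush, spanC, bGo]
  | cons l ls ih =>
    obtain ⟨ihOut, ihIn⟩ := ih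
    constructor
    · intro i acc bs
      rw [PySem.List.enumerate_cons, List.foldl_cons]
      by_cases hc : PySem.Str.startswith l comment_symbol = true
      · simp only [aStep, hc, Bool.true_and, Bool.not_false, Bool.false_eq_true, if_false, if_true]
        rw [ihIn]
        simp only [bGo, hc, reduceIte]
        push_cast
        ring_nf
      · simp only [aStep, Bool.eq_false_iff.mpr hc, Bool.false_and, Bool.not_false, Bool.false_eq_true, if_false, if_true]
        rw [ihOut]
        simp only [bGo, Bool.eq_false_iff.mpr hc, Bool.false_eq_true, if_false]
    · intro i acc bs bl
      rw [PySem.List.enumerate_cons, List.foldl_cons]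
      by_cases hc : PySem.Str.startswith l comment_symbol = true
      · simp only [aStep, hc, Bool.true_and, Bool.not_true, Bool.and_false, Bool.false_eq_true, if_false, if_true]
        rw [ihIn]
        simp only [spanC, hc, reduceIte]
        push_cast
        ring_nf
      · simp only [aStep, Bool.eq_false_iff.mpr hc, Bool.false_and, Bool.false_eq_true, if_false, if_true]
        rw [ihOut]
        simp only [spanC, bGo, Bool.eq_false_iff.mpr hc, Bool.false_eq_true, if_false]
        push_cast
        ring_nf

-- ===== VERDICT (by name: the statement is the Claim_ definition above) =====
theorem get_comment_blocks_spec : Claim_equal_get_comment_blocks := by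
  intro file_content comment_symbol _
  unfold Spec_get_comment_blocks get_comment_blocks get_comment_blocks_alt
  have h := (a_eq_b comment_symbol file_content).1 0 PySem.Set.empty 0
  simpa [aFlush] using h
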